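-- pv_equiv track=rewrite | github.com/Anderson842/LabADAGrupoC | Aula10/AViciousPikeman.py | aViciousPikerman
-- ===== SOURCE A (Python) =====
-- MOD = 1000000007
--
-- def aViciousPikerman(n,time,lis):
--     total_time= 0
--     penalty=0
--     for i,t in enumerate(lis):
--         if total_time + t > time:
--             return i, penalty
--         total_time += t
--         penalty = (penalty + total_time) % MOD
--     return n, penalty
-- ===== SOURCE B (Python) =====
-- MOD = 1000000007
--
-- def aViciousPikerman(n, time, lis):
--     # Phase 1: how many problems fit?  Carry the REMAINING budget instead of a
--     # running total: problem t fits iff t <= budget, then budget shrinks by t.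
--     budget = time
--     k = 0
--     for t in lis:
--         if t > budget:
--             break
--         budget -= t
--         k += 1
--     # Phase 2: closed form.  The sum of the first k cumulative times is the
--     # weighted sum sum_{j<k} (k - j) * lis[j]; one final mod replaces A's
--     # per-step reduction.
--     penalty = sum((k - j) * lis[j] for j in range(k)) % MOD
--     return (n if k == len(lis) else k), penalty
-- ===== Notes on version B (the rewrite author's own statement) =====
-- stated objective: alternative
-- what changed: Instead of accumulating a running total and summing the prefix sums with a per-step mod, B counts the feasible run by decrementing the remaining budget and then computes the penalty in closed form as the weighted sum sum_{j<k}(k-j)*lis[j] with a single final mod.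
import Mathlib
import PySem

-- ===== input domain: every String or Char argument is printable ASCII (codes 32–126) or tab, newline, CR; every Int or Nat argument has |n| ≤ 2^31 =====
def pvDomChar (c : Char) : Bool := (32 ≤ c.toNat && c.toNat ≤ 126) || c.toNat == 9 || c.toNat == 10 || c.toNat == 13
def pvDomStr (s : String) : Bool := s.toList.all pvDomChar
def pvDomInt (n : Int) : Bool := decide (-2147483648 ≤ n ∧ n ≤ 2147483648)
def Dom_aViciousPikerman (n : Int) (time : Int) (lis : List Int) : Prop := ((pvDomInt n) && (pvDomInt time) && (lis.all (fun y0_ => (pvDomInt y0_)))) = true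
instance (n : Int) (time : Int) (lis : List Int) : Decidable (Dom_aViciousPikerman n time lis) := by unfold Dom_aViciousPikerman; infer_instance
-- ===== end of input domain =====

-- B replaces A's running-total/prefix-sum-accumulation loop by a budget-decrement
-- count followed by a closed-form weighted sum for the penalty (alternative; same cost).


-- ===== PORT A =====
-- A's for-loop with early return: structural recursion over lis carrying the
-- enumerate index i, the running total and the running (reduced) penalty.
def aPikeLoop (n : Int) (time : Int) (i : Int) (total : Int) (penalty : Int) :
    List Int → Int × Int
  | [] => (n, penalty)
  | t :: rest =>
    if total + t > time then (i, penalty)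
    else aPikeLoop n time (i + 1) (total + t)
      (PySem.Int.mod (penalty + (total + t)) 1000000007) rest

def aViciousPikerman (n : Int) (time : Int) (lis : List Int) : Int × Int :=
  aPikeLoop n time 0 0 0 lis

-- ===== PORT B =====
-- Source B phase 1: the for/break loop counting how many problems fit, carrying the
-- remaining budget.
def bCount (budget : Int) : List Int → Nat
  | [] => 0
  | t :: rest => if t > budget then 0 else bCount (budget - t) rest + 1

-- Source B phase 2: sum((k - j) * lis[j] for j in range(k)).  Since k = bCount ≤
-- len(lis), every index j < k is valid, so List.getD is exact for lis[j] here.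
def aViciousPikerman_alt (n : Int) (time : Int) (lis : List Int) : Int × Int :=
  let k := bCount time lis
  let penalty := PySem.Int.mod
    (((List.range k).map (fun (j : Nat) => ((k : Int) - (j : Int)) * lis.getD j 0)).sum)
    1000000007
  ((if (k : Int) = (lis.length : Int) then n else (k : Int)), penalty)

-- ===== PRECONDITION & SPEC =====
def Spec_aViciousPikerman (n : Int) (time : Int) (lis : List Int) (out : Int × Int) : Prop := out = aViciousPikerman_alt n time lis
instance (n : Int) (time : Int) (lis : List Int) (out : Int × Int) : Decidable (Spec_aViciousPikerman n time lis out) := by unfold Spec_aViciousPikerman; infer_instance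

-- ===== CLAIM (what is proved, stated in full; the proofs are below) =====
def Claim_equal_aViciousPikerman : Prop := ∀ (n : Int) (time : Int) (lis : List Int), Dom_aViciousPikerman n time lis → Spec_aViciousPikerman n time lis (aViciousPikerman n time lis)

-- ===== LEMMAS AND PROOFS =====

-- Python's % with the positive literal modulus is Int.emod.
theorem mod_big (a : Int) : PySem.Int.mod a 1000000007 = a % 1000000007 := by
  rw [PySem.Int.mod_eq_emod_of_pos]; norm_num

-- B's weighted sum, as a function of k, for the proofs.
def wsum (k : Nat) (lis : List Int) : Int :=
  ((List.range k).map (fun (j : Nat) => ((k : Int) - (j : Int)) * lis.getD j 0)).sum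

theorem wsum_succ_cons (k : Nat) (t : Int) (rest : List Int) :
    wsum (k + 1) (t :: rest) = ((k : Int) + 1) * t + wsum k rest := by
  unfold wsum
  rw [List.range_succ_eq_map]
  simp only [List.map_cons, List.map_map, List.sum_cons, Nat.cast_zero, sub_zero,
    List.getD_cons_zero]
  have h : ∀ j ∈ List.range k,
      ((fun (j : Nat) => (((k + 1 : Nat) : Int) - (j : Int)) * (t :: rest).getD j 0) ∘ Nat.succ) j
        = ((k : Int) - (j : Int)) * rest.getD j 0 := by
    intro j _
    simp only [Function.comp, List.getD_cons_succ]
    push_cast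
    ring
  rw [List.map_congr_left h]
  push_cast
  ring_nf

-- Loop invariant relating A's loop to B's two phases, for any start state with a
-- reduced carried penalty.
theorem aPikeLoop_eq (n time : Int) (lis : List Int) :
    ∀ (i total penalty : Int), penalty % 1000000007 = penalty →
    aPikeLoop n time i total penalty lis =
      (let k := bCount (time - total) lis
       ((if (k : Int) = (lis.length : Int) then n else i + (k : Int)),
        (penalty + (k : Int) * total + wsum k lis) % 1000000007)) := by
  induction lis with
  | nil =>
    intro i total penalty h
    simp [aPikeLoop, bCount, wsum, h]
  | cons t rest ih =>
    intro i total penalty h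
    by_cases hgt : total + t > time
    · have hb : t > time - total := by omega
      simp only [aPikeLoop, if_pos hgt, bCount, if_pos hb]
      simp [wsum, h]
      omega
    · have hb : ¬ (t > time - total) := by omega
      have hred : (PySem.Int.mod (penalty + (total + t)) 1000000007) % 1000000007
          = PySem.Int.mod (penalty + (total + t)) 1000000007 := by
        rw [mod_big]; omega
      have hstep := ih (i + 1) (total + t) _ hred
      simp only [aPikeLoop, if_neg hgt, bCount, if_neg hb]
      rw [hstep, mod_big]
      have harith : time - total - t = time - (total + t) := by ring
      rw [harith]
      set k := bCount (time - (total + t)) rest with hk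
      simp only [List.length_cons, wsum_succ_cons, Prod.mk.injEq]
      constructor
      · push_cast
        split <;> rename_i hlen
        · rw [if_pos (by omega)]
        · rw [if_neg (by omega)]; ring
      · rw [add_assoc, Int.emod_add_emod, ← add_assoc]
        congr 1
        push_cast
        ring

-- ===== VERDICT (by name: the statement is the Claim_ definition above) =====
theorem aViciousPikerman_spec : Claim_equal_aViciousPikerman := by
  intro n time lis _
  unfold Spec_aViciousPikerman aViciousPikerman aViciousPikerman_alt
  rw [aPikeLoop_eq n time lis 0 0 0 (by norm_num)]
  simp [wsum]
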